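-- pv_equiv track=rewrite | github.com/hkk828/ProblemSolving | samsung/BeadEscape2/bead_escape2.py | tilt_row_left
-- ===== SOURCE A (Python) =====
-- def tilt_row_left(row):
--     tilted_row = row[:]
--
--     # 빨간구슬과 파란구슬의 index를 저장한다 (없으면 -1)
--     red = tilted_row.index('R') if 'R' in tilted_row else -1
--     blue = tilted_row.index('B') if 'B' in tilted_row else -1
--
--     # front에는 더 왼쪽에 있는 구슬의 index, back에는 나머지 구슬의 index를 저장한다
--     front = red if red < blue else blue
--     back = blue if red < blue else red
--
--     # 최대 (행의 길이 - 3) 번까지 구슬들을 왼쪽으로 움직여준다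
--     for _ in range(len(row)-3):
--         # 앞에 있는 구슬이 왼쪽으로 움직일 수 있는 가능성이 있는 경우만
--         if front in range(2, len(row)-1):
--             # 앞구슬 왼쪽에 구멍이 있으면 앞구슬을 뺀다
--             if tilted_row[front-1] == 'O':
--                 tilted_row[front] = '.'
--                 front = -1
--             # 앞구슬 왼쪽이 비어있으면 앞구슬을 왼쪽으로 한칸 전진시킨다
--             elif tilted_row[front-1] == '.':
--                 tilted_row[front-1], tilted_row[front] = tilted_row[front], tilted_row[front-1]
--                 front -= 1
--
--         # 뒤에 있는 구슬이 왼쪽으로 움직일 수 있는 가능성이 있는 경우만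
--         if back in range(2, len(row)-1):
--             # 뒷구슬 왼쪽에 구멍이 있으면 뒷구슬을 뺸다
--             if tilted_row[back-1] == 'O':
--                 tilted_row[back] = '.'
--                 back = -1
--             # 뒷구슬 왼쪽이 비어있으면 뒷구슬을 왼쪽으로 한칸 전진시킨다
--             elif tilted_row[back-1] == '.':
--                 tilted_row[back-1], tilted_row[back] = tilted_row[back], tilted_row[back-1]
--                 back -= 1
--
--     return tilted_row
-- ===== SOURCE B (Python) =====
-- def _find(t, ch):
--     # first index of ch in t, or -1
--     for i, c in enumerate(t):
--         if c == ch: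
--             return i
--     return -1
--
--
-- def _settle(t, n, j):
--     # final index of a bead currently at j after tilting the board t left,
--     # or None if it falls into a hole on the way
--     while 2 <= j < n - 1:
--         if t[j - 1] == 'O':
--             return None
--         if t[j - 1] != '.':
--             break
--         j -= 1
--     return j
--
--
-- def tilt_row_left(row):
--     # Settle each bead to its final cell directly (front bead, then back bead):
--     # one non-mutating leftward scan per bead plus a single placement.
--     n = len(row)
--     out = list(row)
--     red = _find(row, 'R')
--     blue = _find(row, 'B')
--     front, back = (red, blue) if red < blue else (blue, red)
--     for j in (front, back):
--         if j >= 0: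
--             d = _settle(out, n, j)
--             bead = out[j]
--             out[j] = '.'
--             if d is not None:
--                 out[d] = bead
--     return out
-- ===== Notes on version B (the rewrite author's own statement) =====
-- stated objective: alternative
-- what changed: A runs len(row)-3 synchronized rounds, each advancing both beads by at most one cell via in-place swaps; B has no round loop: it locates each bead by an enumeration scan, computes the bead's final cell with one non-mutating leftward scan (front bead first, then the back bead on the updated board), and writes each surviving bead once.
import Mathlib
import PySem

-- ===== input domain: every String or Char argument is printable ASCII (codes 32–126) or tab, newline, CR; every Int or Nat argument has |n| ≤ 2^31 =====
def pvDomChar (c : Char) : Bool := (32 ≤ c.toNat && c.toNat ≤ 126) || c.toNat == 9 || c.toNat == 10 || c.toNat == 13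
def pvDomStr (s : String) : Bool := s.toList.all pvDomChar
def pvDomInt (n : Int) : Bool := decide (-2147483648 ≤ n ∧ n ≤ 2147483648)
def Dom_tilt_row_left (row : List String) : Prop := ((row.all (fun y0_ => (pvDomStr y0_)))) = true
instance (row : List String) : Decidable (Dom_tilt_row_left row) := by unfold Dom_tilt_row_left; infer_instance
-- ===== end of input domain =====

-- B replaces A's (len-3)-round simultaneous two-bead simulation: it finds each bead by an
-- enumeration scan and settles it to its final cell directly — one non-mutating leftward
-- scan plus a single placement per bead (objective: alternative decomposition, same value).

-- shared indexing helper: Python's t[i]; both programs only read it with an index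
-- guarded to be in range, so the `getD ""` default is never the value of a real cell
def getS (t : List String) (i : Int) : String := (PySem.List.pyGet? t i).getD ""

-- ===== PORT A =====
-- the per-bead block repeated twice in the body of A's for-loop
-- ("if this bead can still move, drop it into a hole / slide it one cell left")
def step1 (n : Nat) (s : List String × Int) : List String × Int :=
  if 2 ≤ s.2 ∧ s.2 < (n : Int) - 1 then
    if getS s.1 (s.2 - 1) = "O" then (s.1.set s.2.toNat ".", -1)
    else if getS s.1 (s.2 - 1) = "." then
      ((s.1.set (s.2 - 1).toNat (getS s.1 s.2)).set s.2.toNat (getS s.1 (s.2 - 1)), s.2 - 1)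
    else s
  else s

-- one iteration of A's for-loop: the block for `front`, then the block for `back`
def stepA (n : Nat) (s : List String × Int × Int) : List String × Int × Int :=
  let fr := step1 n (s.1, s.2.1)
  let bk := step1 n (fr.1, s.2.2)
  (bk.1, fr.2, bk.2)

def tilt_row_left (row : List String) : List String :=
  let n := row.length
  let red : Int := if row.contains "R" then (((PySem.List.index? row "R").getD 0 : Nat) : Int) else -1
  let blue : Int := if row.contains "B" then (((PySem.List.index? row "B").getD 0 : Nat) : Int) else -1
  let front : Int := if red < blue then red else blue
  let back : Int := if red < blue then blue else red
  ((List.range (n - 3)).foldl (fun s _ => stepA n s) (row, front, back)).1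

-- ===== PORT B =====
-- B's _find: enumerate-and-return loop — first index of ch in t, or -1
def findB (t : List String) (ch : String) (i : Int) : Int :=
  match t with
  | [] => -1
  | c :: rest => if c = ch then i else findB rest ch (i + 1)

-- B's _settle: final index of a bead currently at j on board t; none = falls into a hole
def settleB (t : List String) (n : Nat) (j : Int) : Option Int :=
  if h : 2 ≤ j ∧ j < (n : Int) - 1 then
    if getS t (j - 1) = "O" then none
    else if getS t (j - 1) ≠ "." then some j
    else settleB t n (j - 1)
  else some j
termination_by j.toNat
decreasing_by omega

-- the body of B's for-loop over (front, back): clear the bead's cell, then place it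
def placeB (t : List String) (n : Nat) (j : Int) : List String :=
  if 0 ≤ j then
    match settleB t n j with
    | none => t.set j.toNat "."
    | some d => (t.set j.toNat ".").set d.toNat (getS t j)
  else t

def tilt_row_left_alt (row : List String) : List String :=
  let n := row.length
  let red := findB row "R" 0
  let blue := findB row "B" 0
  let front := if red < blue then red else blue
  let back := if red < blue then blue else red
  placeB (placeB row n front) n back

-- ===== PRECONDITION & SPEC =====
def Spec_tilt_row_left (row : List String) (out : List String) : Prop := out = tilt_row_left_alt row
instance (row : List String) (out : List String) : Decidable (Spec_tilt_row_left row out) := by unfold Spec_tilt_row_left; infer_instance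

-- ===== CLAIM (what is proved, stated in full; the proofs are below) =====
def Claim_equal_tilt_row_left : Prop := ∀ (row : List String), Dom_tilt_row_left row → Spec_tilt_row_left row (tilt_row_left row)

-- ===== LEMMAS AND PROOFS =====

-- proof-only helper: the sequential "settle one bead completely, mutating as it goes"
-- loop; A's interleaved simulation is reduced to two runs of it, which are then shown
-- to equal B's scan-and-place
def moveBead (n : Nat) (t : List String) (j : Int) : List String :=
  if h : 2 ≤ j ∧ j < (n : Int) - 1 then
    if getS t (j - 1) = "O" then t.set j.toNat "."
    else if getS t (j - 1) = "." then
      moveBead n ((t.set (j - 1).toNat (getS t j)).set j.toNat (getS t (j - 1))) (j - 1)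
    else t
  else t
termination_by j.toNat
decreasing_by omega

lemma foldl_const_range {α : Type} (g : α → α) : ∀ (k : Nat) (s : α),
    (List.range k).foldl (fun s _ => g s) s = g^[k] s := by
  intro k
  induction k with
  | zero => intro s; rfl
  | succ k ih =>
    intro s
    rw [List.range_succ, List.foldl_append, ih, Function.iterate_succ_apply']
    rfl

lemma step1_len (n : Nat) (s : List String × Int) : ((step1 n s).1).length = s.1.length := by
  unfold step1; split_ifs <;> simp

lemma its_len (n : Nat) : ∀ (k : Nat) (s : List String × Int),
    (((step1 n)^[k]) s).1.length = s.1.length := by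
  intro k
  induction k with
  | zero => intro s; rfl
  | succ k ih => intro s; rw [Function.iterate_succ_apply, ih, step1_len]

lemma step1_out (n : Nat) (t : List String) (j : Int) (h : ¬(2 ≤ j ∧ j < (n : Int) - 1)) :
    step1 n (t, j) = (t, j) := by
  unfold step1; rw [if_neg]; exact h

lemma its_out (n : Nat) (k : Nat) (t : List String) (j : Int) (h : ¬(2 ≤ j ∧ j < (n : Int) - 1)) :
    (step1 n)^[k] (t, j) = (t, j) :=
  Function.iterate_fixed (step1_out n t j h) k

lemma getS_set (t : List String) (c i : Int) (v : String) (hc : 0 ≤ c) (hi : 0 ≤ i) :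
    getS (t.set i.toNat v) c = if c = i ∧ i.toNat < t.length then v else getS t c := by
  unfold getS
  rw [PySem.List.pyGet?_of_nonneg _ hc, PySem.List.pyGet?_of_nonneg _ hc, List.getElem?_set]
  by_cases h1 : i.toNat = c.toNat
  · have hci : c = i := by omega
    by_cases h2 : i.toNat < t.length
    · have h2' : c.toNat < t.length := h1 ▸ h2
      simp [h1, hci, h2']
    · have : ¬ (c = i ∧ i.toNat < t.length) := by tauto
      rw [if_pos h1, if_neg h2, if_neg this, List.getElem?_eq_none (l := t) (by omega)]
  · have : ¬ (c = i ∧ i.toNat < t.length) := by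
      rintro ⟨rfl, _⟩; exact h1 rfl
    rw [if_neg h1, if_neg this]

lemma getS_natCast (t : List String) (i : Nat) (h : i < t.length) : getS t (i : Int) = t[i] := by
  unfold getS
  rw [PySem.List.pyGet?_natCast]
  simp [List.getElem?_eq_getElem h]

lemma eq_of_cells (t u : List String) (hl : t.length = u.length)
    (h : ∀ c : Int, 0 ≤ c → getS t c = getS u c) : t = u := by
  apply List.ext_getElem hl
  intro i h1 h2
  have h3 := h i (Int.natCast_nonneg i)
  rwa [getS_natCast t i h1, getS_natCast u i h2] at h3

lemma run_eq_moveBead (n : Nat) : ∀ (k : Nat) (t : List String) (j : Int),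
    (j - 1 ≤ (k : Int) ∨ ¬(2 ≤ j ∧ j < (n : Int) - 1)) →
    (((step1 n)^[k]) (t, j)).1 = moveBead n t j := by
  intro k
  induction k with
  | zero =>
    intro t j h
    have hout : ¬(2 ≤ j ∧ j < (n : Int) - 1) := by
      rcases h with h | h
      · intro hr; omega
      · exact h
    rw [moveBead, dif_neg hout]
    rfl
  | succ k ih =>
    intro t j h
    by_cases hr : 2 ≤ j ∧ j < (n : Int) - 1
    · rw [Function.iterate_succ_apply, moveBead, dif_pos hr]
      by_cases hO : getS t (j - 1) = "O"
      · have hs : step1 n (t, j) = (t.set j.toNat ".", -1) := by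
          simp [step1, hr, hO]
        rw [hs, its_out n k _ (-1) (by omega), if_pos hO]
      · by_cases hD : getS t (j - 1) = "."
        · have hs : step1 n (t, j) =
              ((t.set (j - 1).toNat (getS t j)).set j.toNat (getS t (j - 1)), j - 1) := by
            simp [step1, hr, hD]
          rw [hs, if_neg hO, if_pos hD]
          exact ih _ _ (Or.inl (by omega))
        · have hs : step1 n (t, j) = (t, j) := by
            simp [step1, hr, hO, hD]
          rw [hs, Function.iterate_fixed hs k, if_neg hO, if_neg hD]
    · rw [its_out n (k + 1) t j hr, moveBead, dif_neg hr]

lemma run_stays_above (n : Nat) : ∀ (k : Nat) (t : List String) (b p : Int),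
    t.length = n → 0 ≤ p → (p < b ∨ ¬(2 ≤ b ∧ b < (n : Int) - 1)) → getS t p ≠ "." →
    (∀ c : Int, 0 ≤ c → c ≤ p → getS (((step1 n)^[k]) (t, b)).1 c = getS t c) ∧
    (p < (((step1 n)^[k]) (t, b)).2 ∨
      ¬(2 ≤ (((step1 n)^[k]) (t, b)).2 ∧ (((step1 n)^[k]) (t, b)).2 < (n : Int) - 1)) := by
  intro k
  induction k with
  | zero => intro t b p _ _ hb hp; exact ⟨fun c _ _ => rfl, hb⟩
  | succ k ih =>
    intro t b p hlen hp0 hb hp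
    by_cases hr : 2 ≤ b ∧ b < (n : Int) - 1
    · have hpb : p < b := hb.resolve_right (not_not_intro hr)
      rw [Function.iterate_succ_apply]
      by_cases hO : getS t (b - 1) = "O"
      · have hs : step1 n (t, b) = (t.set b.toNat ".", -1) := by
          simp [step1, hr, hO]
        rw [hs, its_out n k _ (-1) (by omega)]
        constructor
        · intro c hc0 hcp
          rw [getS_set t c b "." hc0 (by omega), if_neg (by rintro ⟨h1, _⟩; omega)]
        · right; omega
      · by_cases hD : getS t (b - 1) = "."
        · have hpb1 : p ≠ b - 1 := fun he => hp (he ▸ hD)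
          have hs : step1 n (t, b) =
              ((t.set (b - 1).toNat (getS t b)).set b.toNat (getS t (b - 1)), b - 1) := by
            simp [step1, hr, hD]
          rw [hs]
          set t2 := (t.set (b - 1).toNat (getS t b)).set b.toNat (getS t (b - 1)) with ht2
          have hcells : ∀ c : Int, 0 ≤ c → c ≤ p → getS t2 c = getS t c := by
            intro c hc0 hcp
            rw [ht2, getS_set _ c b _ hc0 (by omega), if_neg (by rintro ⟨h1, _⟩; omega),
              getS_set t c (b - 1) _ hc0 (by omega), if_neg (by rintro ⟨h1, _⟩; omega)]
          have hlen2 : t2.length = n := by simp [ht2, hlen]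
          obtain ⟨ihc, ihpos⟩ := ih t2 (b - 1) p hlen2 hp0 (Or.inl (by omega))
            (by rw [hcells p hp0 le_rfl]; exact hp)
          exact ⟨fun c hc0 hcp => (ihc c hc0 hcp).trans (hcells c hc0 hcp), ihpos⟩
        · have hs : step1 n (t, b) = (t, b) := by
            simp [step1, hr, hO, hD]
          rw [hs]
          exact ih t b p hlen hp0 hb hp
    · rw [its_out n (k + 1) t b hr]
      exact ⟨fun c _ _ => rfl, Or.inr hr⟩

lemma run_cong (n : Nat) : ∀ (k : Nat) (t t' : List String) (b m : Int),
    0 ≤ m → m + k ≤ b → t.length = n → t'.length = n →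
    (∀ c : Int, m ≤ c → getS t c = getS t' c) →
    ((((step1 n)^[k]) (t, b)).2 = (((step1 n)^[k]) (t', b)).2) ∧
    (∀ c : Int, m ≤ c → getS (((step1 n)^[k]) (t, b)).1 c = getS (((step1 n)^[k]) (t', b)).1 c) ∧
    (∀ c : Int, 0 ≤ c → c < m →
      getS (((step1 n)^[k]) (t, b)).1 c = getS t c ∧
      getS (((step1 n)^[k]) (t', b)).1 c = getS t' c) := by
  intro k
  induction k with
  | zero => intro t t' b m _ _ _ _ hag; exact ⟨rfl, hag, fun c _ _ => ⟨rfl, rfl⟩⟩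
  | succ k ih =>
    intro t t' b m hm0 hmk hlt hlt' hag
    by_cases hr : 2 ≤ b ∧ b < (n : Int) - 1
    · have hread : getS t (b - 1) = getS t' (b - 1) := hag _ (by omega)
      rw [Function.iterate_succ_apply, Function.iterate_succ_apply]
      by_cases hO : getS t (b - 1) = "O"
      · have hO' : getS t' (b - 1) = "O" := hread ▸ hO
        have hs : step1 n (t, b) = (t.set b.toNat ".", -1) := by simp [step1, hr, hO]
        have hs' : step1 n (t', b) = (t'.set b.toNat ".", -1) := by simp [step1, hr, hO']
        rw [hs, hs', its_out n k _ (-1) (by omega), its_out n k _ (-1) (by omega)]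
        refine ⟨rfl, ?_, ?_⟩
        · intro c hc
          rw [getS_set t c b _ (by omega) (by omega), getS_set t' c b _ (by omega) (by omega),
            hlt, hlt']
          split_ifs with h
          · rfl
          · exact hag c hc
        · intro c hc0 hcm
          constructor
          · rw [getS_set t c b _ hc0 (by omega), if_neg (by rintro ⟨h1, _⟩; omega)]
          · rw [getS_set t' c b _ hc0 (by omega), if_neg (by rintro ⟨h1, _⟩; omega)]
      · by_cases hD : getS t (b - 1) = "."
        · have hO' : ¬ getS t' (b - 1) = "O" := hread ▸ hO
          have hD' : getS t' (b - 1) = "." := hread ▸ hD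
          have hvb : getS t b = getS t' b := hag _ (by omega)
          have hs : step1 n (t, b) =
              ((t.set (b - 1).toNat (getS t b)).set b.toNat (getS t (b - 1)), b - 1) := by
            simp [step1, hr, hD]
          have hs' : step1 n (t', b) =
              ((t'.set (b - 1).toNat (getS t' b)).set b.toNat (getS t' (b - 1)), b - 1) := by
            simp [step1, hr, hD']
          rw [hs, hs']
          set t2 := (t.set (b - 1).toNat (getS t b)).set b.toNat (getS t (b - 1)) with ht2
          set t2' := (t'.set (b - 1).toNat (getS t' b)).set b.toNat (getS t' (b - 1)) with ht2'
          have hlen2 : t2.length = n := by simp [ht2, hlt]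
          have hlen2' : t2'.length = n := by simp [ht2', hlt']
          have hag2 : ∀ c : Int, m ≤ c → getS t2 c = getS t2' c := by
            intro c hc
            rw [ht2, ht2', getS_set _ c b _ (by omega) (by omega),
              getS_set _ c b _ (by omega) (by omega),
              getS_set t c (b - 1) _ (by omega) (by omega),
              getS_set t' c (b - 1) _ (by omega) (by omega), hlt, hlt',
              List.length_set, List.length_set, hlt, hlt', hread, hvb]
            split_ifs with h1 h2
            · rfl
            · rfl
            · exact hag c hc
          have hpres2 : ∀ c : Int, 0 ≤ c → c < m →
              getS t2 c = getS t c ∧ getS t2' c = getS t' c := by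
            intro c hc0 hcm
            constructor
            · rw [ht2, getS_set _ c b _ hc0 (by omega), if_neg (by rintro ⟨h1, _⟩; omega),
                getS_set t c (b - 1) _ hc0 (by omega), if_neg (by rintro ⟨h1, _⟩; omega)]
            · rw [ht2', getS_set _ c b _ hc0 (by omega), if_neg (by rintro ⟨h1, _⟩; omega),
                getS_set t' c (b - 1) _ hc0 (by omega), if_neg (by rintro ⟨h1, _⟩; omega)]
          obtain ⟨hpos, hagr, hpres⟩ := ih t2 t2' (b - 1) m hm0 (by omega) hlen2 hlen2' hag2
          refine ⟨hpos, hagr, ?_⟩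
          intro c hc0 hcm
          obtain ⟨q1, q2⟩ := hpres c hc0 hcm
          obtain ⟨p1, p2⟩ := hpres2 c hc0 hcm
          exact ⟨q1.trans p1, q2.trans p2⟩
        · have hO' : ¬ getS t' (b - 1) = "O" := hread ▸ hO
          have hD' : ¬ getS t' (b - 1) = "." := hread ▸ hD
          have hs : step1 n (t, b) = (t, b) := by simp [step1, hr, hO, hD]
          have hs' : step1 n (t', b) = (t', b) := by simp [step1, hr, hO', hD']
          rw [hs, hs']
          exact ih t t' b m hm0 (by omega) hlt hlt' hag
    · rw [its_out n (k + 1) t b hr, its_out n (k + 1) t' b hr]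
      exact ⟨rfl, hag, fun c _ _ => ⟨rfl, rfl⟩⟩

lemma main_interleave (n : Nat) (t0 : List String) (hlen : t0.length = n) (f b : Int)
    (hfb : f < b) (hbead : f = -1 ∨ (0 ≤ f ∧ getS t0 f ≠ ".")) :
    ∀ k : Nat,
    (stepA n)^[k] (t0, f, b) =
      (((step1 n)^[k] (((step1 n)^[k] (t0, f)).1, b)).1,
       ((step1 n)^[k] (t0, f)).2,
       ((step1 n)^[k] (((step1 n)^[k] (t0, f)).1, b)).2) ∧
    (((step1 n)^[k] (t0, f)).2 = -1 ∨
       (0 ≤ ((step1 n)^[k] (t0, f)).2 ∧ ((step1 n)^[k] (t0, f)).2 ≤ f ∧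
        getS ((step1 n)^[k] (t0, f)).1 (((step1 n)^[k] (t0, f)).2) ≠ ".")) ∧
    (((step1 n)^[k] (t0, f)).2 = f - k ∨ step1 n ((step1 n)^[k] (t0, f)) = (step1 n)^[k] (t0, f)) := by
  intro k
  induction k with
  | zero =>
    refine ⟨rfl, ?_, Or.inl (by simp)⟩
    rcases hbead with h | ⟨h1, h2⟩
    · exact Or.inl h
    · exact Or.inr ⟨h1, le_rfl, h2⟩
  | succ k ih =>
    obtain ⟨hEq, hI1, hI3⟩ := ih
    simp only [Function.iterate_succ_apply']
    rw [hEq]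
    have hlen1 := its_len n k (t0, f)
    rw [hlen] at hlen1
    generalize hF : (step1 n)^[k] (t0, f) = F at *
    obtain ⟨t1, fk⟩ := F
    dsimp only at hlen1 hI1 hI3 ⊢
    by_cases hch : step1 n (t1, fk) = (t1, fk)
    · rw [hch]
      dsimp only
      have hlenB := its_len n k (t1, b)
      rw [hlen1] at hlenB
      have hstay0 := run_stays_above n k t1 b fk hlen1
      generalize hB : (step1 n)^[k] (t1, b) = B at *
      obtain ⟨t2, bk⟩ := B
      dsimp only at hlenB hstay0 ⊢
      refine ⟨?_, hI1, Or.inr hch⟩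
      have hfrd : step1 n (t2, fk) = (t2, fk) := by
        by_cases hfr : 2 ≤ fk ∧ fk < (n : Int) - 1
        · rcases hI1 with hm1 | ⟨h0, hle, hcell⟩
          · exact absurd hfr (by omega)
          · have hstay := hstay0 h0 (Or.inl (by omega)) hcell
            have hc1 : getS t2 (fk - 1) = getS t1 (fk - 1) := hstay.1 _ (by omega) (by omega)
            by_cases hO : getS t1 (fk - 1) = "O"
            · exfalso
              have h2 : step1 n (t1, fk) = (t1.set fk.toNat ".", -1) := by
                simp [step1, hfr, hO]
              rw [hch] at h2
              have := congrArg Prod.snd h2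
              dsimp at this
              omega
            · by_cases hD : getS t1 (fk - 1) = "."
              · exfalso
                have h2 : step1 n (t1, fk) =
                    ((t1.set (fk - 1).toNat (getS t1 fk)).set fk.toNat (getS t1 (fk - 1)), fk - 1) := by
                  simp [step1, hfr, hD]
                rw [hch] at h2
                have := congrArg Prod.snd h2
                dsimp at this
                omega
              · simp [step1, hfr, hc1, hO, hD]
        · exact step1_out n t2 fk hfr
      simp [stepA, hfrd]
    · have hfr : 2 ≤ fk ∧ fk < (n : Int) - 1 := by
        by_contra h; exact hch (step1_out n t1 fk h)
      rcases hI1 with hm1 | ⟨h0, hle, hcell⟩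
      · exact absurd hfr (by omega)
      have hfk' : fk = f - k := hI3.resolve_right hch
      have hm0 : (0 : Int) ≤ fk + 1 := by omega
      have hmk : fk + 1 + (k : Int) ≤ b := by omega
      have hcong := run_cong n k t1 t1 b (fk + 1) hm0 hmk hlen1 hlen1 (fun c _ => rfl)
      have hpres : ∀ c : Int, 0 ≤ c → c < fk + 1 →
          getS ((step1 n)^[k] (t1, b)).1 c = getS t1 c := fun c h1 h2 => (hcong.2.2 c h1 h2).1
      have hlenB := its_len n k (t1, b)
      rw [hlen1] at hlenB
      by_cases hO : getS t1 (fk - 1) = "O"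
      · have hsF : step1 n (t1, fk) = (t1.set fk.toNat ".", -1) := by
          simp [step1, hfr, hO]
        have hO2 : getS ((step1 n)^[k] (t1, b)).1 (fk - 1) = "O" := by
          rw [hpres _ (by omega) (by omega)]; exact hO
        have hagset : ∀ c : Int, fk + 1 ≤ c → getS t1 c = getS (t1.set fk.toNat ".") c := by
          intro c hcm
          rw [getS_set t1 c fk _ (by omega) (by omega), if_neg (by rintro ⟨h1, _⟩; omega)]
        have hcong2 := run_cong n k t1 (t1.set fk.toNat ".") b (fk + 1) hm0 hmk hlen1
          (by simp [hlen1]) hagset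
        have hLpair : (step1 n)^[k] (t1.set fk.toNat ".", b) =
            (((step1 n)^[k] (t1, b)).1.set fk.toNat ".", ((step1 n)^[k] (t1, b)).2) := by
        -- cellwise: below fk+1 both are the front's write over preserved cells, above both runs agree
          have hl2 := its_len n k (t1.set fk.toNat ".", b)
          refine Prod.ext ?_ hcong2.1.symm
          apply eq_of_cells
          · rw [hl2]; simp [hlen1, hlenB]
          · intro c hc0
            by_cases hcm : c < fk + 1
            · rw [(hcong2.2.2 c hc0 hcm).2, getS_set t1 c fk _ hc0 (by omega),
                getS_set _ c fk _ hc0 (by omega), hlen1, hlenB]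
              split_ifs with h
              · rfl
              · exact (hpres c hc0 hcm).symm
            · rw [← hcong2.2.1 c (by omega), getS_set _ c fk _ hc0 (by omega),
                if_neg (by rintro ⟨h1, _⟩; omega)]
        rw [hsF]
        dsimp only
        rw [hLpair]
        have hfrd : step1 n (((step1 n)^[k] (t1, b)).1, fk) =
            ((((step1 n)^[k] (t1, b)).1).set fk.toNat ".", -1) := by
          simp [step1, hfr, hO2]
        refine ⟨by simp [stepA, hfrd], Or.inl rfl, Or.inr ?_⟩
        exact step1_out n _ (-1) (by omega)
      · by_cases hD : getS t1 (fk - 1) = "."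
        · have hsF : step1 n (t1, fk) =
              ((t1.set (fk - 1).toNat (getS t1 fk)).set fk.toNat (getS t1 (fk - 1)), fk - 1) := by
            simp [step1, hfr, hD]
          have hO2 : ¬ getS ((step1 n)^[k] (t1, b)).1 (fk - 1) = "O" := by
            rw [hpres _ (by omega) (by omega)]; exact hO
          have hD2 : getS ((step1 n)^[k] (t1, b)).1 (fk - 1) = "." := by
            rw [hpres _ (by omega) (by omega)]; exact hD
          have hvfk : getS ((step1 n)^[k] (t1, b)).1 fk = getS t1 fk :=
            hpres _ (by omega) (by omega)
          have hagset : ∀ c : Int, fk + 1 ≤ c → getS t1 c =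
              getS ((t1.set (fk - 1).toNat (getS t1 fk)).set fk.toNat (getS t1 (fk - 1))) c := by
            intro c hcm
            rw [getS_set _ c fk _ (by omega) (by omega), if_neg (by rintro ⟨h1, _⟩; omega),
              getS_set t1 c (fk - 1) _ (by omega) (by omega), if_neg (by rintro ⟨h1, _⟩; omega)]
          have hcong2 := run_cong n k t1
            ((t1.set (fk - 1).toNat (getS t1 fk)).set fk.toNat (getS t1 (fk - 1))) b (fk + 1)
            hm0 hmk hlen1 (by simp [hlen1]) hagset
          have hLpair : (step1 n)^[k]
              ((t1.set (fk - 1).toNat (getS t1 fk)).set fk.toNat (getS t1 (fk - 1)), b) =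
              ((((step1 n)^[k] (t1, b)).1.set (fk - 1).toNat
                  (getS ((step1 n)^[k] (t1, b)).1 fk)).set fk.toNat
                  (getS ((step1 n)^[k] (t1, b)).1 (fk - 1)),
               ((step1 n)^[k] (t1, b)).2) := by
            have hl2 := its_len n k
              ((t1.set (fk - 1).toNat (getS t1 fk)).set fk.toNat (getS t1 (fk - 1)), b)
            refine Prod.ext ?_ hcong2.1.symm
            apply eq_of_cells
            · rw [hl2]; simp [hlen1, hlenB]
            · intro c hc0
              by_cases hcm : c < fk + 1
              · rw [(hcong2.2.2 c hc0 hcm).2, getS_set _ c fk _ hc0 (by omega),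
                  getS_set _ c fk _ hc0 (by omega)]
                simp only [List.length_set, hlen1, hlenB]
                split_ifs with h
                · exact (hpres _ (by omega) (by omega)).symm
                · rw [getS_set t1 c (fk - 1) _ hc0 (by omega),
                    getS_set _ c (fk - 1) _ hc0 (by omega)]
                  simp only [hlen1, hlenB]
                  split_ifs with h2
                  · exact (hpres _ (by omega) (by omega)).symm
                  · exact (hpres c hc0 hcm).symm
              · rw [← hcong2.2.1 c (by omega), getS_set _ c fk _ hc0 (by omega),
                  if_neg (by rintro ⟨h1, _⟩; omega),
                  getS_set _ c (fk - 1) _ hc0 (by omega),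
                  if_neg (by rintro ⟨h1, _⟩; omega)]
          rw [hsF]
          dsimp only
          rw [hLpair]
          have hfrd : step1 n (((step1 n)^[k] (t1, b)).1, fk) =
              ((((step1 n)^[k] (t1, b)).1.set (fk - 1).toNat
                  (getS ((step1 n)^[k] (t1, b)).1 fk)).set fk.toNat
                  (getS ((step1 n)^[k] (t1, b)).1 (fk - 1)), fk - 1) := by
            simp [step1, hfr, hD2]
          refine ⟨by simp [stepA, hfrd], Or.inr ⟨by omega, by omega, ?_⟩, Or.inl (by omega)⟩
          rw [getS_set _ (fk - 1) fk _ (by omega) (by omega),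
            if_neg (by rintro ⟨h1, _⟩; omega),
            getS_set t1 (fk - 1) (fk - 1) _ (by omega) (by omega),
            if_pos ⟨rfl, by rw [hlen1]; omega⟩]
          exact hcell
        · exact absurd (by simp [step1, hfr, hO, hD] : step1 n (t1, fk) = (t1, fk)) hch

lemma beadIdx_fact (row : List String) (v : String) (i : Int)
    (hi : i = if row.contains v then (((PySem.List.index? row v).getD 0 : Nat) : Int) else -1) :
    i = -1 ∨ (0 ≤ i ∧ i ≤ (row.length : Int) - 1 ∧ getS row i = v) := by
  by_cases h : row.contains v
  · right
    have hv : v ∈ row := by simpa using h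
    have hs : (PySem.List.index? row v).isSome := by
      rw [PySem.List.index?_isSome_iff]; exact hv
    obtain ⟨kk, hk⟩ := Option.isSome_iff_exists.mp hs
    obtain ⟨hlt, hval, -⟩ := PySem.List.getElem_of_index?_eq_some hk
    rw [hi, if_pos h, hk]
    refine ⟨by positivity, by simp; omega, ?_⟩
    simpa [Option.getD, getS_natCast row kk hlt] using hval
  · left; rw [hi, if_neg h]

-- B's enumeration scan computes A's contains/index? expression
lemma findB_aux (v : String) : ∀ (t : List String) (i : Int),
    findB t v i = (match PySem.List.index? t v with
      | some k => i + (k : Int)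
      | none => -1) := by
  intro t
  induction t with
  | nil => intro i; rfl
  | cons c rest ih =>
    intro i
    by_cases hc : c = v
    · subst hc
      rw [findB, if_pos rfl, PySem.List.index?_cons_self]
      simp
    · rw [findB, if_neg hc, ih (i + 1), PySem.List.index?_cons_of_ne rest hc]
      cases PySem.List.index? rest v with
      | none => rfl
      | some k =>
        simp only [Option.map_some]
        push_cast
        ring

lemma findB_eq_idx (t : List String) (v : String) :
    findB t v 0 = (if t.contains v then (((PySem.List.index? t v).getD 0 : Nat) : Int) else -1) := by
  rw [findB_aux v t 0]
  by_cases h : t.contains v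
  · have hv : v ∈ t := by simpa using h
    have hs : (PySem.List.index? t v).isSome := by
      rw [PySem.List.index?_isSome_iff]; exact hv
    obtain ⟨kk, hk⟩ := Option.isSome_iff_exists.mp hs
    rw [hk, if_pos h]
    simp
  · have hn : PySem.List.index? t v = none := by
      rw [PySem.List.index?_eq_none_iff]; simpa using h
    rw [hn, if_neg h]

lemma settleB_eq (t : List String) (n : Nat) (j : Int) :
    settleB t n j = if 2 ≤ j ∧ j < (n : Int) - 1 then
      (if getS t (j - 1) = "O" then none
       else if getS t (j - 1) ≠ "." then some j
       else settleB t n (j - 1))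
    else some j := by
  rw [settleB]
  split_ifs <;> rfl

-- settleB reads only cells strictly left of j
lemma settle_congr (n : Nat) : ∀ (k : Nat) (j : Int), j.toNat = k →
    ∀ (t t' : List String), (∀ c : Int, 0 ≤ c → c < j → getS t c = getS t' c) →
    settleB t n j = settleB t' n j := by
  intro k
  induction k with
  | zero =>
    intro j hj t t' _
    have h : ¬ (2 ≤ j ∧ j < (n : Int) - 1) := by omega
    rw [settleB_eq, if_neg h, settleB_eq t' n j, if_neg h]
  | succ k ih =>
    intro j hj t t' hag
    by_cases hr : 2 ≤ j ∧ j < (n : Int) - 1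
    · have hc : getS t (j - 1) = getS t' (j - 1) := hag _ (by omega) (by omega)
      rw [settleB_eq, if_pos hr, settleB_eq t' n j, if_pos hr]
      simp only [← hc]
      by_cases hO : getS t (j - 1) = "O"
      · rw [if_pos hO, if_pos hO]
      · rw [if_neg hO, if_neg hO]
        by_cases hD : getS t (j - 1) = "."
        · rw [if_neg (by simpa using hD), if_neg (by simpa using hD)]
          exact ih (j - 1) (by omega) t t' (fun c h1 h2 => hag c h1 (by omega))
        · rw [if_pos (by simpa using hD), if_pos (by simpa using hD)]
    · rw [settleB_eq, if_neg hr, settleB_eq t' n j, if_neg hr]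

-- clearing then re-placing an untouched bead restores the board
lemma clear_place_self (t : List String) (j : Int) (hj : 0 ≤ j) :
    (t.set j.toNat ".").set j.toNat (getS t j) = t := by
  apply eq_of_cells
  · simp
  · intro c hc
    rw [getS_set _ c j _ hc hj, getS_set t c j _ hc hj]
    simp only [List.length_set]
    split_ifs with h
    · obtain ⟨rfl, _⟩ := h
      rfl
    · rfl

-- one swap of the bead left, then clearing its new cell = clearing the old cell
lemma swap_clear (t : List String) (j : Int) (h2 : 2 ≤ j) (hjl : j < (t.length : Int) - 1)
    (hD : getS t (j - 1) = ".") :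
    ((t.set (j - 1).toNat (getS t j)).set j.toNat (getS t (j - 1))).set (j - 1).toNat "." =
      t.set j.toNat "." := by
  apply eq_of_cells
  · simp
  · intro c hc
    rw [getS_set _ c (j - 1) _ hc (by omega), getS_set _ c j _ hc (by omega),
      getS_set _ c (j - 1) _ hc (by omega), getS_set t c j _ hc (by omega)]
    simp only [List.length_set]
    by_cases hc1 : c = j - 1
    · subst hc1
      rw [if_pos ⟨rfl, by omega⟩, if_neg (by rintro ⟨h1, _⟩; omega)]
      exact hD.symm
    · rw [if_neg (by rintro ⟨h1, _⟩; omega)]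
      by_cases hcj : c = j
      · subst hcj
        rw [if_pos ⟨rfl, by omega⟩, if_pos ⟨rfl, by omega⟩]
        exact hD
      · rw [if_neg (by rintro ⟨h1, _⟩; omega), if_neg (by rintro ⟨h1, _⟩; omega),
          if_neg (by rintro ⟨h1, _⟩; omega)]

-- the sequential mutating settle equals B's scan-then-place
lemma move_eq_place (n : Nat) : ∀ (k : Nat) (j : Int), j.toNat = k →
    ∀ (t : List String), t.length = n → moveBead n t j = placeB t n j := by
  intro k
  induction k with
  | zero =>
    intro j hj t hlen
    have hr : ¬ (2 ≤ j ∧ j < (n : Int) - 1) := by omega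
    rw [moveBead, dif_neg hr]
    by_cases hj0 : 0 ≤ j
    · rw [placeB, if_pos hj0, settleB, dif_neg hr]
      exact (clear_place_self t j hj0).symm
    · rw [placeB, if_neg hj0]
  | succ k ih =>
    intro j hj t hlen
    by_cases hr : 2 ≤ j ∧ j < (n : Int) - 1
    · have hj0 : (0 : Int) ≤ j := by omega
      by_cases hO : getS t (j - 1) = "O"
      · have hsv : settleB t n j = none := by
          rw [settleB, dif_pos hr, if_pos hO]
        rw [moveBead, dif_pos hr, if_pos hO, placeB, if_pos hj0, hsv]
      · by_cases hD : getS t (j - 1) = "."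
        · have hsv : settleB t n j = settleB t n (j - 1) := by
            rw [settleB, dif_pos hr, if_neg hO, if_neg (by simp [hD])]
          rw [moveBead, dif_pos hr, if_neg hO, if_pos hD]
          set t2 := (t.set (j - 1).toNat (getS t j)).set j.toNat (getS t (j - 1)) with ht2
          have hlen2 : t2.length = n := by simp [ht2, hlen]
          have hset : settleB t2 n (j - 1) = settleB t n (j - 1) := by
            apply settle_congr n (j - 1).toNat (j - 1) rfl
            intro c hc0 hcj
            rw [ht2, getS_set _ c j _ hc0 (by omega), if_neg (by rintro ⟨h1, _⟩; omega),
              getS_set t c (j - 1) _ hc0 (by omega), if_neg (by rintro ⟨h1, _⟩; omega)]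
          have hbead : getS t2 (j - 1) = getS t j := by
            rw [ht2, getS_set _ (j - 1) j _ (by omega) (by omega),
              if_neg (by rintro ⟨h1, _⟩; omega),
              getS_set t (j - 1) (j - 1) _ (by omega) (by omega),
              if_pos ⟨rfl, by omega⟩]
          have hclear : t2.set (j - 1).toNat "." = t.set j.toNat "." := by
            rw [ht2]
            exact swap_clear t j hr.1 (by omega) hD
          rw [ih (j - 1) (by omega) t2 hlen2, placeB, if_pos (by omega : (0 : Int) ≤ j - 1),
            placeB, if_pos hj0, hset, hsv, hbead, hclear]
        · have hsv : settleB t n j = some j := by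
            rw [settleB, dif_pos hr, if_neg hO, if_pos (by simp [hD])]
          rw [moveBead, dif_pos hr, if_neg hO, if_neg hD, placeB, if_pos hj0, hsv]
          exact (clear_place_self t j hj0).symm
    · rw [moveBead, dif_neg hr]
      by_cases hj0 : 0 ≤ j
      · rw [placeB, if_pos hj0, settleB, dif_neg hr]
        exact (clear_place_self t j hj0).symm
      · rw [placeB, if_neg hj0]

lemma placeB_len (t : List String) (n : Nat) (j : Int) : (placeB t n j).length = t.length := by
  rw [placeB]
  split_ifs with h
  · cases settleB t n j <;> simp
  · rfl

lemma tilt_aux (row : List String) : tilt_row_left row = tilt_row_left_alt row := by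
  simp only [tilt_row_left, tilt_row_left_alt]
  rw [foldl_const_range]
  set n := row.length with hn
  set red : Int := if row.contains "R" then (((PySem.List.index? row "R").getD 0 : Nat) : Int) else -1 with hred
  set blue : Int := if row.contains "B" then (((PySem.List.index? row "B").getD 0 : Nat) : Int) else -1 with hblue
  rw [show findB row "R" 0 = red from (findB_eq_idx row "R").trans hred.symm,
    show findB row "B" 0 = blue from (findB_eq_idx row "B").trans hblue.symm]
  have hRf := beadIdx_fact row "R" red hred
  have hBf := beadIdx_fact row "B" blue hblue
  set front := if red < blue then red else blue with hfront
  set back := if red < blue then blue else red with hback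
  have hplace : ∀ (t : List String) (j : Int), t.length = n → moveBead n t j = placeB t n j :=
    fun t j hl => move_eq_place n j.toNat j rfl t hl
  by_cases hboth : red = -1 ∧ blue = -1
  · have hf : front = -1 := by simp [hfront, hboth.1, hboth.2]
    have hb : back = -1 := by simp [hback, hboth.1, hboth.2]
    rw [hf, hb]
    have hstep : stepA n (row, -1, -1) = (row, -1, -1) := by
      unfold stepA
      rw [step1_out n row (-1) (by omega)]
      dsimp only
      rw [step1_out n row (-1) (by omega)]
    rw [Function.iterate_fixed hstep]
    have hpb : ∀ t : List String, placeB t n (-1) = t := fun t => by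
      rw [placeB, if_neg (by omega)]
    rw [hpb, hpb]
  · have hne : red = blue → red = -1 := by
      intro he
      rcases hRf with h | ⟨h0, _, hvR⟩
      · exact h
      rcases hBf with h | ⟨h0', _, hvB⟩
      · omega
      · exfalso
        have : "R" = "B" := by rw [← hvR, he, hvB]
        exact absurd this (by decide)
    have hneq : red ≠ blue := by
      intro he
      exact hboth ⟨hne he, by rw [← he]; exact hne he⟩
    have hfb : front < back := by
      by_cases hlt : red < blue
      · rw [hfront, hback, if_pos hlt, if_pos hlt]; exact hlt
      · rw [hfront, hback, if_neg hlt, if_neg hlt]; omega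
    have hbead : front = -1 ∨ (0 ≤ front ∧ getS row front ≠ ".") := by
      by_cases hlt : red < blue
      · rw [hfront, if_pos hlt]
        rcases hRf with h | ⟨h0, _, hv⟩
        · exact Or.inl h
        · exact Or.inr ⟨h0, by rw [hv]; decide⟩
      · rw [hfront, if_neg hlt]
        rcases hBf with h | ⟨h0, _, hv⟩
        · exact Or.inl h
        · exact Or.inr ⟨h0, by rw [hv]; decide⟩
    have hmain := (main_interleave n row rfl front back hfb hbead (n - 3)).1
    rw [hmain]
    have hc1 : front - 1 ≤ ((n - 3 : Nat) : Int) ∨ ¬(2 ≤ front ∧ front < (n : Int) - 1) := by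
      by_cases h : 2 ≤ front ∧ front < (n : Int) - 1
      · left; omega
      · right; exact h
    have hc2 : back - 1 ≤ ((n - 3 : Nat) : Int) ∨ ¬(2 ≤ back ∧ back < (n : Int) - 1) := by
      by_cases h : 2 ≤ back ∧ back < (n : Int) - 1
      · left; omega
      · right; exact h
    rw [run_eq_moveBead n (n - 3) row front hc1, run_eq_moveBead n (n - 3) _ back hc2,
      hplace row front rfl, hplace _ back (by rw [placeB_len])]

-- ===== VERDICT (by name: the statement is the Claim_ definition above) =====
theorem tilt_row_left_spec : Claim_equal_tilt_row_left := by
  intro row _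
  unfold Spec_tilt_row_left
  exact tilt_aux row
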